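-- pv_equiv track=rewrite | github.com/Lucenx9/agentinit | agentinit/_add.py | _find_heading_line
-- ===== SOURCE A (Python) =====
-- def _find_heading_line(lines: list[str], heading: str) -> int | None:
--     """Return the first markdown heading line index outside fenced code blocks."""
--     in_fence = False
--     fence_marker = ""
--
--     for index, line in enumerate(lines):
--         stripped = line.strip()
--         if stripped.startswith(("```", "~~~")):
--             marker = stripped[:3]
--             if not in_fence:
--                 in_fence = True
--                 fence_marker = marker
--             elif marker == fence_marker:
--                 in_fence = False
--                 fence_marker = ""
--             continue
--
--         if not in_fence and stripped == heading:
--             return index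
--
--     return None
-- ===== SOURCE B (Python) =====
-- def _find_heading_line(lines: list[str], heading: str) -> int | None:
--     """Two-pass version: build an eligibility mask (fence state), then scan it."""
--     mask = []
--     in_fence = False
--     fence_marker = ""
--     for line in lines:
--         stripped = line.strip()
--         if stripped.startswith(("```", "~~~")):
--             mask.append(False)
--             marker = stripped[:3]
--             if not in_fence:
--                 in_fence = True
--                 fence_marker = marker
--             elif marker == fence_marker:
--                 in_fence = False
--                 fence_marker = ""
--         else:
--             mask.append(not in_fence)
--     for i, ok in enumerate(mask):
--         if ok and lines[i].strip() == heading: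
--             return i
--     return None
-- ===== Notes on version B (the rewrite author's own statement) =====
-- stated objective: alternative
-- what changed: Replaces A's single fused loop (fence tracking interleaved with early-return matching) by two passes: first build a boolean eligibility mask from the fence state, then scan the mask for the first eligible line equal to the heading.
import Mathlib
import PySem

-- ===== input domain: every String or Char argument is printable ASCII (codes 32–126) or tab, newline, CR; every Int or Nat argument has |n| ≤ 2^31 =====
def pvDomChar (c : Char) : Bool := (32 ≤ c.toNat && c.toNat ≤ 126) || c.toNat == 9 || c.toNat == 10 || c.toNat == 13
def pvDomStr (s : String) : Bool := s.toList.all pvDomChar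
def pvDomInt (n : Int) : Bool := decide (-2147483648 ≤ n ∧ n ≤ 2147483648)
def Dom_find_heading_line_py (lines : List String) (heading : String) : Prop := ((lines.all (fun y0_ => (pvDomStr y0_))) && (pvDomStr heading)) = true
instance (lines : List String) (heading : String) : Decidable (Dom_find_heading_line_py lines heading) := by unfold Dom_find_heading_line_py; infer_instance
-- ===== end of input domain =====

-- ===== PORT A =====
-- B changes decomposition: two passes (fence mask, then scan) instead of A's fused loop; same cost.
def findA (heading : String) : List String → Int → Bool → String → Option Int
  | [], _, _, _ => none
  | line :: rest, idx, inf, fm =>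
    let s := PySem.Str.strip line
    if PySem.Str.startswith s "```" || PySem.Str.startswith s "~~~" then
      let m := PySem.Str.slice s none (some 3)
      if !inf then findA heading rest (idx + 1) true m
      else if m == fm then findA heading rest (idx + 1) false ""
      else findA heading rest (idx + 1) inf fm
    else if !inf && s == heading then some idx
    else findA heading rest (idx + 1) inf fm

def find_heading_line_py (lines : List String) (heading : String) : Option Int :=
  findA heading lines 0 false ""

-- ===== PORT B =====
def maskB : List String → Bool → String → List Bool
  | [], _, _ => []
  | line :: rest, inf, fm =>
    let s := PySem.Str.strip line
    if PySem.Str.startswith s "```" || PySem.Str.startswith s "~~~" then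
      let m := PySem.Str.slice s none (some 3)
      false :: (if !inf then maskB rest true m
                else if m == fm then maskB rest false ""
                else maskB rest inf fm)
    else (!inf) :: maskB rest inf fm

def scanB (heading : String) : List (Bool × String) → Int → Option Int
  | [], _ => none
  | (ok, line) :: rest, i =>
    if ok && PySem.Str.strip line == heading then some i
    else scanB heading rest (i + 1)

def find_heading_line_py_alt (lines : List String) (heading : String) : Option Int :=
  scanB heading ((maskB lines false "").zip lines) 0

-- ===== PRECONDITION & SPEC =====
def Spec_find_heading_line_py (lines : List String) (heading : String) (out : Option Int) : Prop := out = find_heading_line_py_alt lines heading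
instance (lines : List String) (heading : String) (out : Option Int) : Decidable (Spec_find_heading_line_py lines heading out) := by unfold Spec_find_heading_line_py; infer_instance

-- ===== CLAIM (what is proved, stated in full; the proofs are below) =====
def Claim_equal_find_heading_line_py : Prop := ∀ (lines : List String) (heading : String), Dom_find_heading_line_py lines heading → Spec_find_heading_line_py lines heading (find_heading_line_py lines heading)

-- ===== LEMMAS AND PROOFS =====
theorem findA_eq_scan (heading : String) (ls : List String) :
    ∀ (idx : Int) (inf : Bool) (fm : String),
      findA heading ls idx inf fm = scanB heading ((maskB ls inf fm).zip ls) idx := by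
  induction ls with
  | nil => intro idx inf fm; rfl
  | cons line rest ih =>
    intro idx inf fm
    simp only [findA, maskB]
    split_ifs with h1 h2 h3 h4
    · simp only [List.zip_cons_cons, scanB, Bool.false_and, Bool.false_eq_true, if_false]
      exact ih _ _ _
    · simp only [List.zip_cons_cons, scanB, Bool.false_and, Bool.false_eq_true, if_false]
      exact ih _ _ _
    · simp only [List.zip_cons_cons, scanB, Bool.false_and, Bool.false_eq_true, if_false]
      exact ih _ _ _
    · simp only [List.zip_cons_cons, scanB]
      rw [if_pos h4]
    · simp only [List.zip_cons_cons, scanB]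
      rw [if_neg h4]
      exact ih _ _ _

-- ===== VERDICT (by name: the statement is the Claim_ definition above) =====
theorem find_heading_line_py_spec : Claim_equal_find_heading_line_py := by
  intro lines heading _
  unfold Spec_find_heading_line_py find_heading_line_py find_heading_line_py_alt
  exact findA_eq_scan heading lines 0 false ""
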